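-- pv_equiv track=rewrite | github.com/nicolasdickenmann/builddatsetadvanced | network-design-main/topobench/topobench/graph_files/plot_graph.py | DFS
-- ===== SOURCE A (Python) =====
-- V=18
--
-- def DFS(graph, marked, n, vert, start, count):
--     # mark the vertex vert as visited
--     marked[vert] = True
--
--     # if the path of length (n-1) is found
--     if n == 0:
--
--         # mark vert as un-visited to make
--         # it usable again.
--         marked[vert] = False
--
--         # Check if vertex vert can end with
--         # vertex start
--         if graph[vert][start] == 1:
--             count = count + 1
--             return count
--         else:
--             return count
--
--             # For searching every possible path of
--     # length (n-1)
--     for i in range(V):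
--         if marked[i] == False and graph[vert][i] == 1:
--             # DFS for searching path by decreasing
--             # length by 1
--             count = DFS(graph, marked, n - 1, i, start, count)
--
--             # marking vert as unvisited to make it
--     # usable again.
--     marked[vert] = False
--     return count
-- ===== SOURCE B (Python) =====
-- V = 18
--
-- def DFS(graph, marked, n, vert, start, count):
--     # Pure recursion over an immutable visited set instead of A's
--     # backtracking mutation of the shared `marked` list; `count` is added
--     # once at the top instead of being threaded through every call.
--     # Net side effect on `marked` (marked[vert] ends up False) matches A.
--     def paths(visited, n, vert):
--         if n == 0:
--             return 1 if graph[vert][start] == 1 else 0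
--         total = 0
--         for i in range(V):
--             if i not in visited and graph[vert][i] == 1:
--                 total += paths(visited | {i}, n - 1, i)
--         return total
--
--     marked[vert] = True
--     visited = {i for i in range(V) if marked[i]} if n != 0 else set()
--     result = count + paths(visited, n, vert)
--     marked[vert] = False
--     return result
-- ===== Notes on version B (the rewrite author's own statement) =====
-- stated objective: alternative
-- what changed: A's backtracking DFS that mutates the shared marked list and threads the running count through every recursive call is replaced by a pure recursion over an immutable visited set whose sibling subtree counts are summed directly, with count added once at the top.
import Mathlib
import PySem

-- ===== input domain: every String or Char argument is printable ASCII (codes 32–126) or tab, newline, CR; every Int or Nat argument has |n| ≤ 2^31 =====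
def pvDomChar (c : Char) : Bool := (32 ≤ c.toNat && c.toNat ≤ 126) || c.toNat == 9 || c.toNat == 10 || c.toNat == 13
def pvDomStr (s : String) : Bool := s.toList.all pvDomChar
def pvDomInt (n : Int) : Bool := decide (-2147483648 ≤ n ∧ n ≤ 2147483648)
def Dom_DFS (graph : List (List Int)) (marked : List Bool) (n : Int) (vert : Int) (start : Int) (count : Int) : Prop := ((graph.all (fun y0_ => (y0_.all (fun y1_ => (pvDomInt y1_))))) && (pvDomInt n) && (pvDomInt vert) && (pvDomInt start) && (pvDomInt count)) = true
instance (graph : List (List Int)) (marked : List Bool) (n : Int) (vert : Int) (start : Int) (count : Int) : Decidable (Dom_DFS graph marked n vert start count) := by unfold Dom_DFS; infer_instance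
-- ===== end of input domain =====

-- B replaces A's backtracking mutation of the shared `marked` list (count threaded through
-- every recursive call) by a pure recursion over an immutable visited set with direct
-- summation of subtree counts (objective: alternative).  The equivalence proved is about
-- the RETURN value; Source B also reproduces A's net mutation (marked[vert] ends up False).

-- ===== PORT A =====
-- graph[v][j]  (total via defaults; Pre_DFS keeps every performed access in range)
def pvAdjA (graph : List (List Int)) (v j : Int) : Int :=
  PySem.List.pyGetD (PySem.List.pyGetD graph v []) j 0

-- A's recursion, `marked` threaded as state (Python mutates it in place and the return
-- restores it); the Nat fuel only makes the recursion structural: A's call depth is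
-- bounded by the 18 vertices, so fuel 19 is never exhausted on inputs Pre_DFS admits.
def pvGoA (graph : List (List Int)) (start : Int) (fuel : Nat) (m : List Bool)
    (n vert c : Int) : Int × List Bool :=
  match fuel with
  | 0 => (c, m)
  | fuel' + 1 =>
    let m1 := PySem.List.pySetD m vert true                      -- marked[vert] = True
    if n = 0 then
      let m2 := PySem.List.pySetD m1 vert false                  -- marked[vert] = False
      if pvAdjA graph vert start = 1 then (c + 1, m2) else (c, m2)
    else
      let st := (PySem.List.pyRange 0 18 1).foldl                -- for i in range(V)
        (fun (st : Int × List Bool) (i : Int) =>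
          if PySem.List.pyGetD st.2 i true = false ∧ pvAdjA graph vert i = 1 then
            pvGoA graph start fuel' st.2 (n - 1) i st.1
          else st) (c, m1)
      (st.1, PySem.List.pySetD st.2 vert false)                  -- marked[vert] = False
termination_by fuel

def DFS (graph : List (List Int)) (marked : List Bool) (n : Int) (vert : Int) (start : Int) (count : Int) : Int :=
  (pvGoA graph start 19 marked n vert count).1

-- ===== PORT B =====
-- graph[v][j] for the B side
def pvAdjB (graph : List (List Int)) (v j : Int) : Int :=
  PySem.List.pyGetD (PySem.List.pyGetD graph v []) j 0

-- termination measure for B's pure recursion: vertices of 0..17 not yet visited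
def pvUnvisited (visited : List Int) : Nat :=
  ((Finset.range 18).filter (fun j : Nat => ((j : Int) ∉ visited))).card

lemma pvUnvisited_union_lt (visited : List Int) (i : Nat) (hi : i < 18)
    (hm : (i : Int) ∉ visited) :
    pvUnvisited (PySem.Set.union visited [(i : Int)]) < pvUnvisited visited := by
  unfold pvUnvisited
  have hsub : (Finset.range 18).filter (fun j : Nat => ((j : Int) ∉ PySem.Set.union visited [(i : Int)]))
      ⊆ (Finset.range 18).filter (fun j : Nat => ((j : Int) ∉ visited)) := by
    intro j hj
    simp only [Finset.mem_filter] at hj ⊢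
    refine ⟨hj.1, fun hmem => hj.2 ?_⟩
    rw [PySem.Set.mem_union]; exact Or.inl hmem
  have hmem : i ∈ (Finset.range 18).filter (fun j : Nat => ((j : Int) ∉ visited)) :=
    Finset.mem_filter.mpr ⟨Finset.mem_range.mpr hi, hm⟩
  have hnot : i ∉ (Finset.range 18).filter (fun j : Nat => ((j : Int) ∉ PySem.Set.union visited [(i : Int)])) := by
    simp [Finset.mem_filter, PySem.Set.mem_union]
  exact Finset.card_lt_card ((Finset.ssubset_iff_of_subset hsub).mpr ⟨i, hmem, hnot⟩)

-- Source B's inner `paths(visited, n, vert)` (pure, no state threading, direct summation)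
def pvPaths (graph : List (List Int)) (start : Int) (visited : PySem.Set Int)
    (n vert : Int) : Int :=
  if n = 0 then (if pvAdjB graph vert start = 1 then 1 else 0)
  else
    (List.range 18).attach.foldl                                  -- for i in range(V)
      (fun (total : Int) (i : {x // x ∈ List.range 18}) =>
        if h : ((i.1 : Int) ∉ visited) ∧ pvAdjB graph vert (i.1 : Int) = 1 then
          total + pvPaths graph start (PySem.Set.union visited [(i.1 : Int)]) (n - 1) (i.1 : Int)
        else total) 0
termination_by pvUnvisited visited
decreasing_by
  exact pvUnvisited_union_lt visited i.1 (by simpa using i.2) h.1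

def DFS_alt (graph : List (List Int)) (marked : List Bool) (n : Int) (vert : Int) (start : Int) (count : Int) : Int :=
  let m1 := PySem.List.pySetD marked vert true                   -- marked[vert] = True
  let visited : PySem.Set Int :=                                 -- {i for i in range(V) if marked[i]} if n != 0 else set()
    if n ≠ 0 then
      PySem.Set.ofList (((List.range 18).filter
        (fun i : Nat => PySem.List.pyGetD m1 (i : Int) false = true)).map (fun i : Nat => (i : Int)))
    else []
  count + pvPaths graph start visited n vert

-- ===== PRECONDITION & SPEC =====
-- Pre_DFS: inputs on which the Python A returns normally.  For n ≠ 0 it conservatively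
-- requires the full 18-vertex shape (marked and graph of length ≥ 18, every row of
-- length ≥ 18, start a valid index for an 18-row); A can also return on smaller inputs
-- when markings or zero adjacency keep it from touching the missing entries — those
-- inputs are excluded (A and B agree there too, see claim.json cites).
def Pre_DFS (graph : List (List Int)) (marked : List Bool) (n : Int) (vert : Int) (start : Int) (count : Int) : Prop :=
  PySem.Raise.InRange marked.length vert ∧
  PySem.Raise.InRange graph.length vert ∧
  (if n = 0 then
     PySem.Raise.InRange (PySem.List.pyGetD graph vert []).length start
   else
     18 ≤ marked.length ∧ 18 ≤ graph.length ∧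
       (∀ row ∈ graph, 18 ≤ row.length) ∧ PySem.Raise.InRange 18 start)
instance (graph : List (List Int)) (marked : List Bool) (n : Int) (vert : Int) (start : Int) (count : Int) : Decidable (Pre_DFS graph marked n vert start count) := by unfold Pre_DFS; infer_instance

def pvWitness_DFS : List (List Int) × List Bool × Int × Int × Int × Int :=
  ([[1]], [false], 0, 0, 0, 0)

def Spec_DFS (graph : List (List Int)) (marked : List Bool) (n : Int) (vert : Int) (start : Int) (count : Int) (out : Int) : Prop := out = DFS_alt graph marked n vert start count
instance (graph : List (List Int)) (marked : List Bool) (n : Int) (vert : Int) (start : Int) (count : Int) (out : Int) : Decidable (Spec_DFS graph marked n vert start count out) := by unfold Spec_DFS; infer_instance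

-- ===== CLAIM (what is proved, stated in full; the proofs are below) =====
def Claim_equal_DFS : Prop := ∀ (graph : List (List Int)) (marked : List Bool) (n : Int) (vert : Int) (start : Int) (count : Int), Dom_DFS graph marked n vert start count → Pre_DFS graph marked n vert start count → Spec_DFS graph marked n vert start count (DFS graph marked n vert start count)

-- ===== LEMMAS AND PROOFS =====
lemma pvAdj_eq : pvAdjB = pvAdjA := rfl

lemma pv_list_set_self {α : Type} (xs : List α) (i : Nat) (a : α)
    (h : i < xs.length) (hv : xs[i] = a) : xs.set i a = xs := by
  apply List.ext_getElem (by simp)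
  intro k hk1 hk2
  rw [List.getElem_set]
  split
  · next hik => subst hik; exact hv.symm
  · rfl

lemma pv_pySetD_pySetD (m : List Bool) (v : Int) (a b : Bool) :
    PySem.List.pySetD (PySem.List.pySetD m v a) v b = PySem.List.pySetD m v b := by
  simp only [PySem.List.pySetD, PySem.List.pySet?]
  rcases h : PySem.List.pyIdx? m.length v with _ | k
  · simp [h]
  · simp [h, List.set_set]

lemma pv_foldl_if_add (F : Nat → Int) (p : Nat → Prop) [DecidablePred p] :
    ∀ (l : List Nat) (t : Int),
      l.foldl (fun tot i => if p i then tot + F i else tot) t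
        = t + l.foldl (fun tot i => if p i then tot + F i else tot) 0 := by
  intro l
  induction l with
  | nil => intro t; simp
  | cons i l ih =>
    intro t
    simp only [List.foldl_cons]
    by_cases hp : p i
    · rw [if_pos hp, if_pos hp, ih (t + F i), ih (0 + F i)]; ring
    · rw [if_neg hp, if_neg hp]; exact ih t

-- the main invariant: A's mutating recursion computes count + B's pure count, and
-- restores marked except for marked[vert] := False
lemma pv_main (graph : List (List Int)) (start : Int) :
    ∀ (fuel : Nat) (m : List Bool) (visited : PySem.Set Int) (n vert c : Int),
      18 ≤ m.length →
      (∀ j : Nat, j < 18 →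
        ((j : Int) ∈ visited ↔
          PySem.List.pyGetD (PySem.List.pySetD m vert true) (j : Int) false = true)) →
      pvUnvisited visited < fuel →
      pvGoA graph start fuel m n vert c
        = (c + pvPaths graph start visited n vert, PySem.List.pySetD m vert false) := by
  intro fuel
  induction fuel with
  | zero => intro _ _ _ _ _ _ _ h; omega
  | succ fuel ih =>
    intro m visited n vert c hlen hinv hfuel
    rw [pvGoA.eq_2, pvPaths]
    by_cases hn : n = 0
    · simp only [hn, reduceIte, pvAdj_eq]
      rw [pv_pySetD_pySetD]
      split <;> first | rfl | simp
    · simp only [if_neg hn]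
      have hlen1 : (PySem.List.pySetD m vert true).length = m.length :=
        PySem.List.length_pySetD m vert true
      -- rewrite A's loop as a fold over List.range 18
      have hrange : PySem.List.pyRange 0 18 1 = (List.range 18).map (fun i : Nat => (i : Int)) := by
        decide
      rw [hrange, List.foldl_map]
      -- rewrite B's loop over .attach as a fold over List.range 18
      simp only [dite_eq_ite]
      have hattach : (List.range 18).attach.foldl
            (fun (total : Int) (i : {x // x ∈ List.range 18}) =>
              if ((i.1 : Int) ∉ visited) ∧ pvAdjB graph vert (i.1 : Int) = 1 then
                total + pvPaths graph start (PySem.Set.union visited [(i.1 : Int)]) (n - 1) (i.1 : Int)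
              else total) 0
          = (List.range 18).foldl
            (fun (total : Int) (i : Nat) =>
              if ((i : Int) ∉ visited) ∧ pvAdjB graph vert (i : Int) = 1 then
                total + pvPaths graph start (PySem.Set.union visited [(i : Int)]) (n - 1) (i : Int)
              else total) 0 :=
        List.foldl_attach (l := List.range 18) (b := (0 : Int))
          (f := fun (total : Int) (i : Nat) =>
            if ((i : Int) ∉ visited) ∧ pvAdjB graph vert (i : Int) = 1 then
              total + pvPaths graph start (PySem.Set.union visited [(i : Int)]) (n - 1) (i : Int)
            else total)
      rw [hattach]
      -- the generalized loop invariant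
      suffices hloop : ∀ (l : List Nat), (∀ i ∈ l, i < 18) → ∀ (c' : Int),
          l.foldl (fun (st : Int × List Bool) (i : Nat) =>
              if PySem.List.pyGetD st.2 (i : Int) true = false ∧ pvAdjA graph vert (i : Int) = 1 then
                pvGoA graph start fuel st.2 (n - 1) (i : Int) st.1
              else st) (c', PySem.List.pySetD m vert true)
            = (c' + l.foldl (fun (total : Int) (i : Nat) =>
                if ((i : Int) ∉ visited) ∧ pvAdjB graph vert (i : Int) = 1 then
                  total + pvPaths graph start (PySem.Set.union visited [(i : Int)]) (n - 1) (i : Int)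
                else total) 0, PySem.List.pySetD m vert true) by
        rw [hloop (List.range 18) (by intro i hi; simpa using hi) c]
        simp [pv_pySetD_pySetD]
      intro l
      induction l with
      | nil => intro _ c'; simp
      | cons i l ihl =>
        intro hmem c'
        have hi18 : i < 18 := hmem i (by simp)
        have hilen : i < (PySem.List.pySetD m vert true).length := by omega
        simp only [List.foldl_cons]
        have hgetT : PySem.List.pyGetD (PySem.List.pySetD m vert true) (i : Int) true
            = (PySem.List.pySetD m vert true)[i] := by
          rw [PySem.List.pyGetD_natCast, List.getD_eq_getElem _ _ hilen]
        have hgetF : PySem.List.pyGetD (PySem.List.pySetD m vert true) (i : Int) false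
            = (PySem.List.pySetD m vert true)[i] := by
          rw [PySem.List.pyGetD_natCast, List.getD_eq_getElem _ _ hilen]
        have hinv_i := hinv i hi18
        rw [hgetF] at hinv_i
        by_cases hA : (PySem.List.pySetD m vert true)[i] = false ∧ pvAdjA graph vert (i : Int) = 1
        · -- guard fires on both sides
          have hnotv : (i : Int) ∉ visited := by
            intro hmemv
            have := hinv_i.mp hmemv
            rw [hA.1] at this
            exact Bool.false_ne_true this
          rw [if_pos (by rw [hgetT]; exact hA)]
          have hrec := ih (PySem.List.pySetD m vert true)
              (PySem.Set.union visited [(i : Int)]) (n - 1) (i : Int) c'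
            (by omega)
            (by
              intro j hj18
              have hjlen : j < (PySem.List.pySetD m vert true).length := by omega
              rw [PySem.List.pySetD_natCast, PySem.List.pyGetD_natCast,
                List.getD_eq_getElem _ _ (by simpa using hjlen), List.getElem_set,
                PySem.Set.mem_union, List.mem_singleton]
              by_cases hji : j = i
              · subst hji
                simp
              · have hcast : ¬ ((j : Int) = (i : Int)) := by exact_mod_cast hji
                rw [if_neg (fun h => hji h.symm)]
                have hj := hinv j hj18
                have hgj : PySem.List.pyGetD (PySem.List.pySetD m vert true) (j : Int) false
                    = (PySem.List.pySetD m vert true)[j] := by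
                  rw [PySem.List.pyGetD_natCast, List.getD_eq_getElem _ _ hjlen]
                rw [hgj] at hj
                rw [← hj]
                constructor
                · rintro (h | h)
                  · exact h
                  · exact absurd h hcast
                · exact Or.inl)
            (by
              have := pvUnvisited_union_lt visited i hi18 hnotv
              omega)
          rw [hrec]
          have hset : PySem.List.pySetD (PySem.List.pySetD m vert true) (i : Int) false
              = PySem.List.pySetD m vert true := by
            rw [PySem.List.pySetD_natCast]
            exact pv_list_set_self _ i false hilen hA.1
          rw [hset]
          rw [ihl (fun x hx => hmem x (by simp [hx])) _]
          rw [if_pos ⟨hnotv, by rw [pvAdj_eq]; exact hA.2⟩]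
          rw [pv_foldl_if_add
            (fun i : Nat => pvPaths graph start (PySem.Set.union visited [(i : Int)]) (n - 1) (i : Int))
            (fun i : Nat => ((i : Int) ∉ visited) ∧ pvAdjB graph vert (i : Int) = 1) l (0 + _)]
          refine Prod.ext ?_ rfl
          simp only []
          ring
        · -- guard fails on both sides
          rw [if_neg (by rw [hgetT]; exact hA)]
          rw [ihl (fun x hx => hmem x (by simp [hx])) c']
          have hBfail : ¬ (((i : Int) ∉ visited) ∧ pvAdjB graph vert (i : Int) = 1) := by
            rw [pvAdj_eq]
            intro hB
            apply hA
            refine ⟨?_, hB.2⟩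
            cases hmi : (PySem.List.pySetD m vert true)[i] with
            | false => rfl
            | true => exact absurd (hinv_i.mpr (by rw [hmi])) hB.1
          rw [if_neg hBfail]

-- ===== VERDICT (by name: the statement is the Claim_ definition above) =====
theorem DFS_spec : Claim_equal_DFS := by
  intro graph marked n vert start count _hDom hPre
  simp only [Spec_DFS, DFS, DFS_alt]
  by_cases hn : n = 0
  · subst hn
    rw [show (19 : Nat) = Nat.succ 18 from rfl, pvGoA.eq_2, pvPaths]
    simp only [reduceIte, pvAdj_eq, ne_eq, not_true_eq_false, if_false]
    rw [pv_pySetD_pySetD]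
    split <;> first | rfl | simp
  · obtain ⟨-, -, hPre3⟩ := hPre
    rw [if_neg hn] at hPre3
    obtain ⟨hmlen, -, -, -⟩ := hPre3
    have hkey := pv_main graph start 19 marked
      (PySem.Set.ofList (((List.range 18).filter
        (fun i : Nat => PySem.List.pyGetD (PySem.List.pySetD marked vert true) (i : Int) false = true)).map
        (fun i : Nat => (i : Int))))
      n vert count hmlen
      (by
        intro j hj18
        rw [PySem.Set.mem_ofList, List.mem_map]
        constructor
        · rintro ⟨k, hk, hkj⟩
          rw [List.mem_filter, List.mem_range] at hk
          have hkji : k = j := by exact_mod_cast hkj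
          subst hkji
          exact of_decide_eq_true hk.2
        · intro hp
          exact ⟨j, by rw [List.mem_filter, List.mem_range]; exact ⟨hj18, decide_eq_true hp⟩, rfl⟩)
      (by
        have hle : pvUnvisited (PySem.Set.ofList (((List.range 18).filter
            (fun i : Nat => PySem.List.pyGetD (PySem.List.pySetD marked vert true) (i : Int) false = true)).map
            (fun i : Nat => (i : Int)))) ≤ 18 := by
          unfold pvUnvisited
          calc _ ≤ (Finset.range 18).card := Finset.card_filter_le _ _
            _ = 18 := Finset.card_range 18
        omega)
    rw [hkey]
    simp [hn]
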